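-- pv_equiv track=rewrite | github.com/Adamv27/NP-Complete | approx_solution/cs412_mingraphcoloring_approx.py | assign_color
-- ===== SOURCE A (Python) =====
-- def assign_color(graph, v, colors):
--     neighbor_colors = set()
--     for u in graph[v]:
--         if u in colors:
--             neighbor_colors.add(colors[u])
--
--     #neighbor_colors = {colors[neighbor] for neighbor in graph[v] if neighbor in colors}
--
--     color = 1
--     while color in neighbor_colors:
--         color += 1
--
--     return color
-- ===== SOURCE B (Python) =====
-- def assign_color(graph, v, colors):
--     used = sorted({colors[u] for u in graph[v] if u in colors})
--     color = 1
--     for x in used: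
--         if x < color:
--             continue
--         if x == color:
--             color += 1
--         else:
--             break
--     return color
-- ===== Notes on version B (the rewrite author's own statement) =====
-- stated objective: alternative
-- what changed: Replaces A's repeated set-membership probing ('while color in neighbor_colors') with a single first-gap scan over the sorted neighbor colors.
import Mathlib
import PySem

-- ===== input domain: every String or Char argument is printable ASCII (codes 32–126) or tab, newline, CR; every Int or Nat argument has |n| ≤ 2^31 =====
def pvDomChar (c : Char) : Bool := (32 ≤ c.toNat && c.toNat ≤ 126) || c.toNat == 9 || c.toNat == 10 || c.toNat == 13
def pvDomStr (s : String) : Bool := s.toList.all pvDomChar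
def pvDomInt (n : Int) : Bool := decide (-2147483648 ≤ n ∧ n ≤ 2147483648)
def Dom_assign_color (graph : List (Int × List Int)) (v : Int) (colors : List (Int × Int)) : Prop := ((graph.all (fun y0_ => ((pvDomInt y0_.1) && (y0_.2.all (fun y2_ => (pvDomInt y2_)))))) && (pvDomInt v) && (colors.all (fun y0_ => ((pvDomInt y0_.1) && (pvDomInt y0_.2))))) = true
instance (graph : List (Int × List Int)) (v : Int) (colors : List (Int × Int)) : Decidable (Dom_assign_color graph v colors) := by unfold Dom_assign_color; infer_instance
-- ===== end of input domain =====

-- B replaces A's repeated set-membership probing with one first-gap scan over the sorted neighbor colors (alternative algorithm, no speed claim).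

-- ===== PORT A =====
-- 'while color in neighbor_colors: color += 1'; fuel = |set| + 1 suffices since the
-- answer is at most |set| + 1 starting from 1.
def probeA (s : List Int) : Int → Nat → Int
  | c, 0 => c
  | c, fuel + 1 => if c ∈ s then probeA s (c + 1) fuel else c

def assign_color (graph : List (Int × List Int)) (v : Int) (colors : List (Int × Int)) : Int :=
  let adj := ((PySem.Dict.mk graph).get? v).getD []   -- graph[v]; KeyError excluded by Pre_
  let neighbor_colors : PySem.Set Int :=
    adj.foldl (fun s u =>
      if (PySem.Dict.mk colors).contains u then
        PySem.Set.add s ((PySem.Dict.mk colors).getD u 0)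
      else s) PySem.Set.empty
  probeA neighbor_colors 1 (neighbor_colors.length + 1)

-- ===== PORT B =====
-- 'for x in used: skip below / bump on equal / break above'
def scanB : Int → List Int → Int
  | c, [] => c
  | c, x :: rest => if x < c then scanB c rest else if x = c then scanB (c + 1) rest else c

def assign_color_alt (graph : List (Int × List Int)) (v : Int) (colors : List (Int × Int)) : Int :=
  let adj := ((PySem.Dict.mk graph).get? v).getD []
  let used := PySem.List.sorted
      (PySem.Set.ofList (adj.filterMap (fun u => (PySem.Dict.mk colors).get? u)))
      (fun x => x) false
  scanB 1 used

-- ===== PRECONDITION & SPEC =====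
-- A raises KeyError when v is not a key of graph; exactly those inputs are excluded.
def Pre_assign_color (graph : List (Int × List Int)) (v : Int) (colors : List (Int × Int)) : Prop :=
  (PySem.Dict.mk graph).contains v = true
instance (graph : List (Int × List Int)) (v : Int) (colors : List (Int × Int)) : Decidable (Pre_assign_color graph v colors) := by unfold Pre_assign_color; infer_instance

def pvWitness_assign_color : (List (Int × List Int)) × Int × (List (Int × Int)) :=
  ([(0, [1, 2]), (1, [0])], 0, [(1, 1), (2, 3)])

def Spec_assign_color (graph : List (Int × List Int)) (v : Int) (colors : List (Int × Int)) (out : Int) : Prop := out = assign_color_alt graph v colors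
instance (graph : List (Int × List Int)) (v : Int) (colors : List (Int × Int)) (out : Int) : Decidable (Spec_assign_color graph v colors out) := by unfold Spec_assign_color; infer_instance

-- ===== CLAIM (what is proved, stated in full; the proofs are below) =====
def Claim_equal_assign_color : Prop := ∀ (graph : List (Int × List Int)) (v : Int) (colors : List (Int × Int)), Dom_assign_color graph v colors → Pre_assign_color graph v colors → Spec_assign_color graph v colors (assign_color graph v colors)

-- ===== LEMMAS AND PROOFS =====

-- The two ports build the same neighbor-color list.
theorem sets_eq (colors : List (Int × Int)) (adj : List Int) (s : PySem.Set Int) :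
    adj.foldl (fun s u =>
      if (PySem.Dict.mk colors).contains u then
        PySem.Set.add s ((PySem.Dict.mk colors).getD u 0)
      else s) s
    = (adj.filterMap (fun u => (PySem.Dict.mk colors).get? u)).foldl PySem.Set.add s := by
  induction adj generalizing s with
  | nil => rfl
  | cons u t ih =>
    simp only [List.foldl_cons, List.filterMap_cons]
    rw [PySem.Dict.contains_eq_isSome_get?]
    cases h : (PySem.Dict.mk colors).get? u with
    | none =>
      simp only [Option.isSome_none, Bool.false_eq_true, if_false]
      exact ih s
    | some w =>
      simp only [Option.isSome_some, if_true, List.foldl_cons]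
      rw [PySem.Dict.getD_eq_get?_getD, h]
      exact ih _

-- "first integer ≥ c missing from s" as a property
def FirstGap (s : List Int) (c r : Int) : Prop :=
  c ≤ r ∧ r ∉ s ∧ ∀ k, c ≤ k → k < r → k ∈ s

theorem firstGap_unique {s : List Int} {c r₁ r₂ : Int}
    (h₁ : FirstGap s c r₁) (h₂ : FirstGap s c r₂) : r₁ = r₂ := by
  obtain ⟨hc₁, hn₁, ha₁⟩ := h₁
  obtain ⟨hc₂, hn₂, ha₂⟩ := h₂
  rcases lt_trichotomy r₁ r₂ with h | h | h
  · exact absurd (ha₂ r₁ hc₁ h) hn₁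
  · exact h
  · exact absurd (ha₁ r₂ hc₂ h) hn₂

theorem countP_lt_of_mem {s : List Int} {c : Int} (h : c ∈ s) :
    s.countP (fun x => decide (c + 1 ≤ x)) < s.countP (fun x => decide (c ≤ x)) := by
  induction s with
  | nil => cases h
  | cons a t ih =>
    have mono : t.countP (fun x => decide (c + 1 ≤ x)) ≤ t.countP (fun x => decide (c ≤ x)) :=
      List.countP_mono_left (fun x _ hx => by
        simp only [decide_eq_true_eq] at hx ⊢; omega)
    simp only [List.countP_cons]
    rcases List.mem_cons.mp h with hca | hmem
    · have e1 : decide (c + 1 ≤ a) = false := by rw [hca]; simp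
      have e2 : decide (c ≤ a) = true := by rw [hca]; simp
      rw [e1, e2]
      simp only [Bool.false_eq_true, if_false, if_true]
      omega
    · have hstrict := ih hmem
      have e3 : (if decide (c + 1 ≤ a) = true then 1 else 0)
          ≤ (if decide (c ≤ a) = true then 1 else 0) := by
        by_cases hx : c + 1 ≤ a
        · have hx' : c ≤ a := by omega
          simp [hx, hx']
        · simp [hx]
      omega

theorem probeA_spec (s : List Int) (c : Int) (fuel : Nat)
    (hfuel : s.countP (fun x => decide (c ≤ x)) < fuel) :
    FirstGap s c (probeA s c fuel) := by
  induction fuel generalizing c with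
  | zero => omega
  | succ n ih =>
    by_cases hc : c ∈ s
    · have hstep : probeA s c (n + 1) = probeA s (c + 1) n := by
        simp only [probeA, hc, if_true]
      have hlt := countP_lt_of_mem hc
      obtain ⟨hle, hn, hall⟩ := ih (c + 1) (by omega)
      rw [hstep]
      refine ⟨by omega, hn, ?_⟩
      intro k hk1 hk2
      rcases eq_or_lt_of_le hk1 with rfl | hlt'
      · exact hc
      · exact hall k (by omega) hk2
    · have hstep : probeA s c (n + 1) = c := by
        simp only [probeA, hc, if_false]
      rw [hstep]
      exact ⟨le_refl c, hc, fun k h1 h2 => by omega⟩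

theorem scanB_spec (l : List Int) (c : Int) (hl : l.Pairwise (· < ·)) :
    FirstGap l c (scanB c l) := by
  induction l generalizing c with
  | nil =>
    refine ⟨le_refl c, by simp [scanB], ?_⟩
    intro k h1 h2
    simp only [scanB] at h2
    omega
  | cons x rest ih =>
    have hlt : ∀ y ∈ rest, x < y := (List.pairwise_cons.mp hl).1
    have hrest := (List.pairwise_cons.mp hl).2
    by_cases h1 : x < c
    · have hsc : scanB c (x :: rest) = scanB c rest := by
        simp only [scanB]; rw [if_pos h1]
      rw [hsc]
      obtain ⟨ha, hb, hc'⟩ := ih c hrest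
      refine ⟨ha, ?_, ?_⟩
      · simp only [List.mem_cons, not_or]
        exact ⟨fun he => by omega, hb⟩
      · intro k hk1 hk2
        exact List.mem_cons_of_mem x (hc' k hk1 hk2)
    · by_cases h2 : x = c
      · subst h2
        have hsc : scanB x (x :: rest) = scanB (x + 1) rest := by
          simp only [scanB]; rw [if_neg (lt_irrefl x)]; simp
        rw [hsc]
        obtain ⟨ha, hb, hc'⟩ := ih (x + 1) hrest
        refine ⟨by omega, ?_, ?_⟩
        · simp only [List.mem_cons, not_or]
          exact ⟨fun he => by omega, hb⟩
        · intro k hk1 hk2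
          rcases eq_or_lt_of_le hk1 with rfl | hlt'
          · exact List.mem_cons_self
          · exact List.mem_cons_of_mem x (hc' k (by omega) hk2)
      · have hsc : scanB c (x :: rest) = c := by
          simp only [scanB]; rw [if_neg h1, if_neg h2]
        rw [hsc]
        refine ⟨le_refl c, ?_, ?_⟩
        · simp only [List.mem_cons, not_or]
          refine ⟨fun he => h2 he.symm, fun hm => ?_⟩
          have := hlt c hm
          omega
        · intro k hk1 hk2
          omega

-- the common core: A's probe and B's gap scan agree on any neighbor list
theorem gap_eq (adj : List Int) (colors : List (Int × Int)) :
    (fun s => probeA s 1 (s.length + 1))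
      (adj.foldl (fun s u =>
        if (PySem.Dict.mk colors).contains u then
          PySem.Set.add s ((PySem.Dict.mk colors).getD u 0)
        else s) PySem.Set.empty)
    = scanB 1 (PySem.List.sorted
        (PySem.Set.ofList (adj.filterMap (fun u => (PySem.Dict.mk colors).get? u)))
        (fun x => x) false) := by
  rw [sets_eq]
  set F := adj.filterMap (fun u => (PySem.Dict.mk colors).get? u) with hF
  have hset : F.foldl PySem.Set.add PySem.Set.empty = PySem.Set.ofList F := by
    rw [PySem.Set.ofList_eq_foldl]; rfl
  rw [hset]
  set s := PySem.Set.ofList F with hs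
  set l := PySem.List.sorted s (fun x => x) false with hl
  have hpl : l.Pairwise (· < ·) := PySem.List.sorted_ofList_pairwise_lt F
  have hmem : ∀ x : Int, x ∈ s ↔ x ∈ l := fun x =>
    (PySem.List.mem_sorted s (fun x => x) false x).symm
  have hA : FirstGap s 1 (probeA s 1 (s.length + 1)) := by
    apply probeA_spec
    calc s.countP (fun x => decide (1 ≤ x)) ≤ s.length := List.countP_le_length
    _ < s.length + 1 := by omega
  have hB : FirstGap l 1 (scanB 1 l) := scanB_spec l 1 hpl
  have hB' : FirstGap s 1 (scanB 1 l) := by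
    obtain ⟨ha, hb, hc⟩ := hB
    exact ⟨ha, fun hm => hb ((hmem _).mp hm), fun k u1 u2 => (hmem k).mpr (hc k u1 u2)⟩
  exact firstGap_unique hA hB'

-- ===== VERDICT (by name: the statement is the Claim_ definition above) =====
theorem assign_color_spec : Claim_equal_assign_color := by
  intro graph v colors _hdom _hpre
  show assign_color graph v colors = assign_color_alt graph v colors
  simp only [assign_color, assign_color_alt]
  exact gap_eq (((PySem.Dict.mk graph).get? v).getD []) colors
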